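-- pv_equiv track=rewrite | github.com/MarcinSzablak/matura-info | 2022/maj/zad_1_2.py | zad_1_2
-- ===== SOURCE A (Python) =====
-- def czy_w(x, m, tab):
--     for y in range(m):
--         if tab[y] == x:
--             return True
--     return False
--
-- def zad_1_2(n, A):
--     k = 0
--     m = 0
--     wystompily = []
--     for x in range(n):
--         if A[x] > n or czy_w(A[x], m, wystompily):
--             k += 1
--         wystompily += [A[x]]
--         m += 1
--     return k
-- ===== SOURCE B (Python) =====
-- def zad_1_2(n, A):
--     # An index x in range(n) is NOT counted exactly when A[x] <= n and it is the
--     # first occurrence of that value, so the answer is n minus the number of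
--     # distinct values <= n in the prefix.
--     small = {A[x] for x in range(n) if A[x] <= n}
--     return len(range(n)) - len(small)
-- ===== Notes on version B (the rewrite author's own statement) =====
-- stated objective: faster
-- what changed: Replaces the per-element linear scan of previously seen values by a single pass building a set of distinct values <= n and returning len(range(n)) minus the set's size.
import Mathlib
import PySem

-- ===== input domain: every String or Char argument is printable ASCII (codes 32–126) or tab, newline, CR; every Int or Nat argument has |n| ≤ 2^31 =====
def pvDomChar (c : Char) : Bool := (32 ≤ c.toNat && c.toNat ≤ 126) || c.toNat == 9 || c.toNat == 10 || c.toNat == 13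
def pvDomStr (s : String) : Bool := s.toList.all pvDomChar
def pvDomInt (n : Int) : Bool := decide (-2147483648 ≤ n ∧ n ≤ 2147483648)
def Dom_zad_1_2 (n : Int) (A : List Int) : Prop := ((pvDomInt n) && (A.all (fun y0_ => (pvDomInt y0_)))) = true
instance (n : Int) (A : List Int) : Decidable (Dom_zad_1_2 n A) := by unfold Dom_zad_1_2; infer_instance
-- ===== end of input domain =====

-- B replaces A's per-element scan of previously seen values by one pass building a
-- set of distinct values ≤ n, returning len(range(n)) - len(set)  (objective: faster).

-- ===== PORT A =====
-- tab[y] is always in range at A's call sites (m = len(tab)), so the total pyGetD is exact here.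
def czy_w (x : Int) (m : Int) (tab : List Int) : Bool :=
  (PySem.List.pyRange 0 m 1).any (fun y => PySem.List.pyGetD tab y 0 == x)

-- A[x] is exact under Pre_zad_1_2 (n ≤ len(A)); outside it Python raises IndexError.
def zad_1_2 (n : Int) (A : List Int) : Int :=
  ((PySem.List.pyRange 0 n 1).foldl
      (fun (s : Int × Int × List Int) (x : Int) =>
        (if PySem.List.pyGetD A x 0 > n || czy_w (PySem.List.pyGetD A x 0) s.2.1 s.2.2
           then s.1 + 1 else s.1,
         s.2.1 + 1,
         s.2.2 ++ [PySem.List.pyGetD A x 0]))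
      (0, 0, [])).1

-- ===== PORT B =====
def zad_1_2_alt (n : Int) (A : List Int) : Int :=
  ((PySem.List.pyRange 0 n 1).length : Int) -
    PySem.Set.len
      ((PySem.List.pyRange 0 n 1).foldl
        (fun (s : PySem.Set Int) (x : Int) =>
          if PySem.List.pyGetD A x 0 ≤ n then PySem.Set.add s (PySem.List.pyGetD A x 0) else s)
        PySem.Set.empty)

-- ===== PRECONDITION & SPEC =====
-- Pre_ excludes exactly the inputs where Python A raises IndexError (n > len(A)).
def Pre_zad_1_2 (n : Int) (A : List Int) : Prop := n ≤ (A.length : Int)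
instance (n : Int) (A : List Int) : Decidable (Pre_zad_1_2 n A) := by unfold Pre_zad_1_2; infer_instance
def pvWitness_zad_1_2 : Int × List Int := (3, [2, 7, 2, 1])

def Spec_zad_1_2 (n : Int) (A : List Int) (out : Int) : Prop := out = zad_1_2_alt n A
instance (n : Int) (A : List Int) (out : Int) : Decidable (Spec_zad_1_2 n A out) := by unfold Spec_zad_1_2; infer_instance

-- ===== CLAIM (what is proved, stated in full; the proofs are below) =====
def Claim_equal_zad_1_2 : Prop := ∀ (n : Int) (A : List Int), Dom_zad_1_2 n A → Pre_zad_1_2 n A → Spec_zad_1_2 n A (zad_1_2 n A)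

-- ===== LEMMAS AND PROOFS =====

lemma czy_w_len (x : Int) (w : List Int) : czy_w x (w.length : Int) w = w.contains x := by
  unfold czy_w
  rw [show (fun y => PySem.List.pyGetD w y 0 == x) = ((· == x) ∘ fun y => PySem.List.pyGetD w y 0) from rfl]
  rw [← List.any_map, PySem.List.map_pyGetD_pyRange_zero', List.any_beq']

-- loop invariant: A's counter plus the size of B's set equals the number of processed elements
lemma main_inv (n : Int) : ∀ (L : List Int) (k : Int) (w s : List Int),
    (∀ b : Int, b ∈ s ↔ (b ∈ w ∧ b ≤ n)) →
    k + (s.length : Int) = (w.length : Int) →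
    (L.foldl
        (fun (st : Int × Int × List Int) (a : Int) =>
          (if a > n || czy_w a st.2.1 st.2.2 then st.1 + 1 else st.1,
           st.2.1 + 1, st.2.2 ++ [a]))
        (k, (w.length : Int), w)).1
      + ((L.foldl (fun (s : PySem.Set Int) (a : Int) => if a ≤ n then PySem.Set.add s a else s) s).length : Int)
      = (w.length : Int) + (L.length : Int) := by
  intro L
  induction L with
  | nil => intro k w s _ hlen; simpa using hlen
  | cons a L ih =>
    intro k w s hmem hlen
    simp only [List.foldl_cons, List.length_cons, Nat.cast_add, Nat.cast_one]
    rw [czy_w_len]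
    by_cases hgt : a > n
    · -- counted because a > n; B does not add
      rw [if_pos (by simp [hgt]), if_neg (by omega)]
      have hmem' : ∀ b : Int, b ∈ s ↔ (b ∈ w ++ [a] ∧ b ≤ n) := by
        intro b
        rw [hmem b, List.mem_append, List.mem_singleton]
        constructor
        · rintro ⟨h1, h2⟩; exact ⟨Or.inl h1, h2⟩
        · rintro ⟨h1 | h1, h2⟩
          · exact ⟨h1, h2⟩
          · subst h1; exact absurd h2 (by omega)
      have H := ih (k + 1) (w ++ [a]) s hmem' (by simp; omega)
      simp only [List.length_append, List.length_cons, List.length_nil, Nat.cast_add,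
        Nat.cast_one, zero_add] at H
      rw [H]; ring
    · by_cases hin : a ∈ w
      · -- duplicate of an earlier value: counted; B's set already contains a
        rw [if_pos (by simp [hin]), if_pos (by omega)]
        have hsa : a ∈ s := (hmem a).2 ⟨hin, by omega⟩
        rw [show PySem.Set.add s a = s by simp [PySem.Set.add, hsa]]
        have hmem' : ∀ b : Int, b ∈ s ↔ (b ∈ w ++ [a] ∧ b ≤ n) := by
          intro b
          rw [hmem b, List.mem_append, List.mem_singleton]
          constructor
          · rintro ⟨h1, h2⟩; exact ⟨Or.inl h1, h2⟩
          · rintro ⟨h1 | h1, h2⟩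
            · exact ⟨h1, h2⟩
            · subst h1; exact ⟨hin, h2⟩
        have H := ih (k + 1) (w ++ [a]) s hmem' (by simp; omega)
        simp only [List.length_append, List.length_cons, List.length_nil, Nat.cast_add,
          Nat.cast_one, zero_add] at H
        rw [H]; ring
      · -- first occurrence of a value ≤ n: not counted; B's set grows by one
        rw [if_neg (by simp [hin]; omega), if_pos (by omega)]
        have hsa : a ∉ s := fun h => hin ((hmem a).1 h).1
        rw [show PySem.Set.add s a = s ++ [a] by simp [PySem.Set.add, hsa]]
        have hmem' : ∀ b : Int, b ∈ s ++ [a] ↔ (b ∈ w ++ [a] ∧ b ≤ n) := by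
          intro b
          rw [List.mem_append, List.mem_singleton, hmem b, List.mem_append, List.mem_singleton]
          constructor
          · rintro (⟨h1, h2⟩ | h1)
            · exact ⟨Or.inl h1, h2⟩
            · subst h1; exact ⟨Or.inr rfl, by omega⟩
          · rintro ⟨h1 | h1, h2⟩
            · exact Or.inl ⟨h1, h2⟩
            · exact Or.inr h1
        have H := ih k (w ++ [a]) (s ++ [a]) hmem' (by simp; omega)
        simp only [List.length_append, List.length_cons, List.length_nil, Nat.cast_add,
          Nat.cast_one, zero_add] at H
        rw [H]; ring

-- ===== VERDICT (by name: the statement is the Claim_ definition above) =====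
theorem zad_1_2_spec : Claim_equal_zad_1_2 := by
  intro n A _ hpre
  unfold Spec_zad_1_2 zad_1_2 zad_1_2_alt
  by_cases hn : n ≤ 0
  · rw [PySem.List.pyRange_one_eq_nil hn]
    simp [PySem.Set.len, PySem.Set.empty]
  · have hpre' : n ≤ (A.length : Int) := hpre
    have hLlen : (((A.take n.toNat).length : Nat) : Int) = n := by
      simp [List.length_take]; omega
    have hget : ∀ x ∈ PySem.List.pyRange 0 n 1,
        PySem.List.pyGetD A x 0 = PySem.List.pyGetD (A.take n.toNat) x 0 := by
      intro x hx
      rw [PySem.List.mem_pyRange_one] at hx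
      rw [PySem.List.pyGetD_of_nonneg A 0 hx.1, PySem.List.pyGetD_of_nonneg _ 0 hx.1,
          List.getD_eq_getElem?_getD, List.getD_eq_getElem?_getD,
          List.getElem?_take_of_lt (by omega)]
    rw [PySem.List.foldl_congr_mem' _ _
          (fun (st : Int × Int × List Int) (x : Int) =>
            (if PySem.List.pyGetD (A.take n.toNat) x 0 > n ||
                 czy_w (PySem.List.pyGetD (A.take n.toNat) x 0) st.2.1 st.2.2
               then st.1 + 1 else st.1,
             st.2.1 + 1, st.2.2 ++ [PySem.List.pyGetD (A.take n.toNat) x 0])) _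
          (by intro x hx st; rw [hget x hx])]
    rw [PySem.List.foldl_congr_mem' _ _
          (fun (s : PySem.Set Int) (x : Int) =>
            if PySem.List.pyGetD (A.take n.toNat) x 0 ≤ n
              then PySem.Set.add s (PySem.List.pyGetD (A.take n.toNat) x 0) else s) _
          (by intro x hx s; rw [hget x hx])]
    rw [show PySem.List.pyRange 0 n 1
          = PySem.List.pyRange 0 (((A.take n.toNat).length : Nat) : Int) 1 by rw [hLlen]]
    rw [PySem.List.foldl_pyRange_zero_pyGetD' (A.take n.toNat) 0
          (fun (st : Int × Int × List Int) (a : Int) =>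
            (if a > n || czy_w a st.2.1 st.2.2 then st.1 + 1 else st.1,
             st.2.1 + 1, st.2.2 ++ [a])) (0, 0, [])]
    rw [PySem.List.foldl_pyRange_zero_pyGetD' (A.take n.toNat) 0
          (fun (s : PySem.Set Int) (a : Int) => if a ≤ n then PySem.Set.add s a else s)
          PySem.Set.empty]
    have H := main_inv n (A.take n.toNat) 0 [] [] (by simp) (by simp)
    simp only [List.length_nil, Nat.cast_zero, zero_add] at H
    simp only [PySem.Set.len, PySem.Set.empty, PySem.List.length_pyRange_one] at H ⊢
    omega
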